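-- pv_equiv track=rewrite | github.com/feroz-hub/sbom | app/validation/stages/detect.py | _looks_like_tag_value
-- ===== SOURCE A (Python) =====
-- def _looks_like_tag_value(text: str) -> bool:
--     """Return True if the first 8 non-comment lines look like SPDX Tag-Value."""
--     seen_tag_lines = 0
--     for raw_line in text.splitlines()[:32]:
--         line = raw_line.strip()
--         if not line or line.startswith("#"):
--             continue
--         if ":" not in line:
--             return False
--         tag, _, _value = line.partition(":")
--         if not tag.strip().isidentifier():
--             return False
--         seen_tag_lines += 1
--         if seen_tag_lines >= 3:
--             return True
--     return False
-- ===== SOURCE B (Python) =====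
-- def _looks_like_tag_value(text: str) -> bool:
--     """Return True if the text looks like SPDX Tag-Value (3 tag lines among the first 32 lines)."""
--     # Single forward pass over the characters with a tiny DFA per line:
--     # state 0 = leading whitespace, 1 = comment line, 2 = inside tag,
--     # 3 = whitespace after tag, 4 = value part (after the colon).
--     state = 0
--     used = 0        # lines fully consumed (only the first 32 are examined)
--     seen = 0        # tag-value lines recognised so far
--     prev_cr = False
--     for c in text:
--         if prev_cr and c == '\n':
--             prev_cr = False
--             continue  # second half of a \r\n line break
--         if c == '\r' or c == '\n':
--             prev_cr = (c == '\r')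
--             if state == 2 or state == 3:
--                 return False  # line ended before any colon
--             state = 0
--             used += 1
--             if used >= 32:
--                 return False
--             continue
--         prev_cr = False
--         if state == 0:
--             if c == ' ' or c == '\t':
--                 pass
--             elif c == '#':
--                 state = 1
--             elif c.isalpha() or c == '_':
--                 state = 2
--             else:
--                 return False
--         elif state == 2:
--             if c.isalnum() or c == '_':
--                 pass
--             elif c == ' ' or c == '\t':
--                 state = 3
--             elif c == ':':
--                 seen += 1
--                 if seen >= 3:
--                     return True
--                 state = 4
--             else:
--                 return False
--         elif state == 3:
--             if c == ' ' or c == '\t':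
--                 pass
--             elif c == ':':
--                 seen += 1
--                 if seen >= 3:
--                     return True
--                 state = 4
--             else:
--                 return False
--         # states 1 and 4 swallow the rest of the line
--     return False
-- ===== Notes on version B (the rewrite author's own statement) =====
-- stated objective: alternative
-- what changed: Replaces A's line-oriented pipeline (splitlines/strip/partition/isidentifier on each of the first 32 lines with a counter) by a single forward character-level DFA that never materialises lines or calls any string method, tracking line state, line count and tag count in one pass.
import Mathlib
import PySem

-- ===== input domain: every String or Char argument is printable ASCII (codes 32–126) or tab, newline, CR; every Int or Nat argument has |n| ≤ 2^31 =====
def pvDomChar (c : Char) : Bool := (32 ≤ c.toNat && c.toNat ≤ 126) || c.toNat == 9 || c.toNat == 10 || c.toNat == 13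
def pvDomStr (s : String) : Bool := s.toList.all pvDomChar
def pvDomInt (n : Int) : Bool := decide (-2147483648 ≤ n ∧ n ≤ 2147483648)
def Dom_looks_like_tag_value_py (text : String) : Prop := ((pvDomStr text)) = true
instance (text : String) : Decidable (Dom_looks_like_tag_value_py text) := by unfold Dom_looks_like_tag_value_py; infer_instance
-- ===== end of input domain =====

-- B replaces A's line-oriented pipeline (splitlines/strip/partition/isidentifier per line)
-- by a single forward character-level DFA with no string methods; objective: alternative.

-- ===== PORT A =====
-- str.isidentifier(), exact on the ASCII domain: nonempty, first char letter or '_',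
-- rest letters/digits/'_'. (PySem has no isidentifier; ported by hand.)
def pvIdentStart (c : Char) : Bool := PySem.Chars.isalpha c || c == '_'
def pvIdentCont (c : Char) : Bool := PySem.Chars.isalnum c || c == '_'

def pvIsIdent (cs : List Char) : Bool :=
  match cs with
  | [] => false
  | c :: rest => pvIdentStart c && rest.all pvIdentCont

-- line.partition(":")[0] : everything before the first ':' (the whole line if none)
def pvTagOf (line : List Char) : List Char := line.takeWhile (fun c => c ≠ ':')

-- A's loop: lines remaining, seen_tag_lines so far; early returns become return values
def lltGoA : List (List Char) → Nat → Bool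
  | [], _ => false
  | raw :: rest, seen =>
    let line := PySem.Chars.strip raw
    if line.isEmpty || PySem.Chars.startswith line ['#'] then
      lltGoA rest seen
    else if !(PySem.Chars.isIn [':'] line) then
      false
    else if !(pvIsIdent (PySem.Chars.strip (pvTagOf line))) then
      false
    else if seen + 1 ≥ 3 then true
    else lltGoA rest (seen + 1)

def looks_like_tag_value_py (text : String) : Bool :=
  lltGoA (PySem.List.slice (PySem.Chars.splitlines text.toList) none (some 32)) 0

-- ===== PORT B =====
-- Source B's single forward pass: per-line DFA state st (0 leading ws, 1 comment, 2 tag,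
-- 3 ws after tag, 4 value), used = completed lines, seen = tag lines, prevCr for \r\n.
def lltB : List Char → Nat → Nat → Nat → Bool → Bool
  | [], _, _, _, _ => false
  | c :: cs, st, used, seen, prevCr =>
    if prevCr ∧ c = '\n' then
      lltB cs st used seen false
    else if c = '\r' ∨ c = '\n' then
      if st = 2 ∨ st = 3 then false
      else if used + 1 ≥ 32 then false
      else lltB cs 0 (used + 1) seen (c = '\r')
    else
      match st with
      | 0 => if c = ' ' ∨ c = '\t' then lltB cs 0 used seen false
             else if c = '#' then lltB cs 1 used seen false
             else if pvIdentStart c then lltB cs 2 used seen false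
             else false
      | 2 => if pvIdentCont c then lltB cs 2 used seen false
             else if c = ' ' ∨ c = '\t' then lltB cs 3 used seen false
             else if c = ':' then (if seen + 1 ≥ 3 then true else lltB cs 4 used (seen + 1) false)
             else false
      | 3 => if c = ' ' ∨ c = '\t' then lltB cs 3 used seen false
             else if c = ':' then (if seen + 1 ≥ 3 then true else lltB cs 4 used (seen + 1) false)
             else false
      | st => lltB cs st used seen false

def looks_like_tag_value_py_alt (text : String) : Bool := lltB text.toList 0 0 0 false

-- ===== PRECONDITION & SPEC =====
def Spec_looks_like_tag_value_py (text : String) (out : Bool) : Prop := out = looks_like_tag_value_py_alt text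
instance (text : String) (out : Bool) : Decidable (Spec_looks_like_tag_value_py text out) := by unfold Spec_looks_like_tag_value_py; infer_instance

-- ===== CLAIM (what is proved, stated in full; the proofs are below) =====
def Claim_equal_looks_like_tag_value_py : Prop := ∀ (text : String), Dom_looks_like_tag_value_py text → Spec_looks_like_tag_value_py text (looks_like_tag_value_py text)

-- ===== LEMMAS AND PROOFS =====


lemma pvCharEq {c d : Char} (h : c.toNat = d.toNat) : c = d := by
  apply Char.ext; unfold Char.toNat at h; exact UInt32.toNat_inj.mp h

lemma pvSpaceIff {c : Char} (hD : (32 ≤ c.toNat ∧ c.toNat ≤ 126) ∨ c.toNat = 9)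
    : PySem.Chars.isspace c = true ↔ (c = ' ' ∨ c = '\t') := by
  constructor
  · intro h
    simp [PySem.Chars.isspace] at h
    have : c.toNat = 32 ∨ c.toNat = 9 := by omega
    rcases this with h' | h'
    · exact Or.inl (pvCharEq h')
    · exact Or.inr (pvCharEq h')
  · rintro (rfl | rfl) <;> decide

lemma pvRstripConsNot {c : Char} {l : List Char} (h : PySem.Chars.isspace c = false) :
    PySem.Chars.rstrip (c :: l) = c :: PySem.Chars.rstrip l := by
  unfold PySem.Chars.rstrip
  rw [List.reverse_cons, List.dropWhile_append]
  by_cases he : (l.reverse.dropWhile PySem.Chars.isspace).isEmpty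
  · simp [he, h, PySem.Chars.rstrip, List.isEmpty_iff.mp he]
  · simp [he, PySem.Chars.rstrip]

lemma pvRstripNilIff {l : List Char} : PySem.Chars.rstrip l = [] ↔ ∀ a ∈ l, PySem.Chars.isspace a := by
  simp [PySem.Chars.rstrip, List.dropWhile_eq_nil_iff]

lemma pvStripConsSpace {c : Char} {l : List Char} (h : PySem.Chars.isspace c = true) :
    PySem.Chars.strip (c :: l) = PySem.Chars.strip l := by
  simp [PySem.Chars.strip, PySem.Chars.lstrip, List.dropWhile_cons, h]

lemma pvStripConsNot {c : Char} {l : List Char} (h : PySem.Chars.isspace c = false) :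
    PySem.Chars.strip (c :: l) = c :: PySem.Chars.rstrip l := by
  simp [PySem.Chars.strip, PySem.Chars.lstrip, List.dropWhile_cons, h, pvRstripConsNot h]

lemma pvRstripDecomp (l : List Char) : ∃ w, l = PySem.Chars.rstrip l ++ w ∧ ∀ a ∈ w, PySem.Chars.isspace a := by
  refine ⟨(l.reverse.takeWhile PySem.Chars.isspace).reverse, ?_, ?_⟩
  · conv_lhs => rw [← l.reverse_reverse, ← List.takeWhile_append_dropWhile (p := PySem.Chars.isspace) (l := l.reverse)]
    rw [List.reverse_append]
    simp [PySem.Chars.rstrip]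
  · intro a ha
    simp at ha
    exact List.mem_takeWhile_imp ha

lemma pvMemRstrip {a : Char} {l : List Char} (h : PySem.Chars.isspace a = false) :
    a ∈ PySem.Chars.rstrip l ↔ a ∈ l := by
  obtain ⟨w, hw, hws⟩ := pvRstripDecomp l
  constructor
  · intro hm; rw [hw]; exact List.mem_append_left _ hm
  · intro hm
    rw [hw] at hm
    rcases List.mem_append.mp hm with hm | hm
    · exact hm
    · exact absurd (hws a hm) (by simp [h])

lemma pvTakeWhileAppend {p : Char → Bool} {xs ys : List Char} (h : ∃ a ∈ xs, p a = false) :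
    (xs ++ ys).takeWhile p = xs.takeWhile p := by
  induction xs with
  | nil => simp at h
  | cons x xs ih =>
    by_cases hx : p x
    · simp [List.takeWhile_cons, hx]
      apply ih
      obtain ⟨a, ha, hpa⟩ := h
      rcases List.mem_cons.mp ha with rfl | ha
      · simp_all
      · exact ⟨a, ha, hpa⟩
    · simp [List.takeWhile_cons, Bool.of_not_eq_true hx]

-- proof-side mirror of lltB's intra-line transitions (no EOL chars)
def pvLineStep : List Char → Nat → Nat → Bool ⊕ (Nat × Nat)
  | [], st, seen => .inr (st, seen)
  | c :: r, st, seen =>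
    match st with
    | 0 => if c = ' ' ∨ c = '\t' then pvLineStep r 0 seen
           else if c = '#' then pvLineStep r 1 seen
           else if pvIdentStart c then pvLineStep r 2 seen
           else .inl false
    | 2 => if pvIdentCont c then pvLineStep r 2 seen
           else if c = ' ' ∨ c = '\t' then pvLineStep r 3 seen
           else if c = ':' then (if seen + 1 ≥ 3 then .inl true else pvLineStep r 4 (seen + 1))
           else .inl false
    | 3 => if c = ' ' ∨ c = '\t' then pvLineStep r 3 seen
           else if c = ':' then (if seen + 1 ≥ 3 then .inl true else pvLineStep r 4 (seen + 1))
           else .inl false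
    | st => pvLineStep r st seen

lemma pvLltBAppend {l : List Char} (hl : ∀ c ∈ l, c ≠ '\r' ∧ c ≠ '\n') :
    ∀ (t : List Char) (st used seen : Nat),
    lltB (l ++ t) st used seen false =
      (match pvLineStep l st seen with
       | .inl b => b
       | .inr (st', seen') => lltB t st' used seen' false) := by
  induction l with
  | nil => intro t st used seen; simp [pvLineStep]
  | cons c r ih =>
    intro t st used seen
    obtain ⟨hcr, hcn⟩ := hl c (by simp)
    have hl' : ∀ c ∈ r, c ≠ '\r' ∧ c ≠ '\n' := fun c hc => hl c (by simp [hc])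
    have hne : ¬ (c = '\r' ∨ c = '\n') := by simp [hcr, hcn]
    rcases st with _ | _ | _ | _ | st
    · simp only [List.cons_append, lltB, pvLineStep, false_and, if_false, hne]
      split_ifs <;> simp_all [ih hl']
    · simp only [List.cons_append, lltB, pvLineStep, false_and, if_false, hne]
      simp [ih hl']
    · simp only [List.cons_append, lltB, pvLineStep, false_and, if_false, hne]
      split_ifs <;> simp_all [ih hl']
    · simp only [List.cons_append, lltB, pvLineStep, false_and, if_false, hne]
      split_ifs <;> simp_all [ih hl']
    · simp only [List.cons_append, lltB, pvLineStep, false_and, if_false, hne]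
      simp [ih hl']

-- states 1 (comment) and 4 (value) swallow the rest of the line
lemma pvLineStepConsume (st : Nat) (hst : st = 1 ∨ 4 ≤ st) :
    ∀ (r : List Char) (seen : Nat), pvLineStep r st seen = .inr (st, seen) := by
  intro r
  induction r with
  | nil => intro seen; simp [pvLineStep]
  | cons c r ih =>
    intro seen
    rcases st with _ | _ | _ | _ | st <;> first
      | (exfalso; omega)
      | simp [pvLineStep, ih]

def pvCharOK (c : Char) : Prop := pvDomChar c = true ∧ c ≠ '\r' ∧ c ≠ '\n'

lemma pvSpaceIff' {c : Char} (h : pvCharOK c) :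
    PySem.Chars.isspace c = true ↔ (c = ' ' ∨ c = '\t') := by
  obtain ⟨hd, hr, hn⟩ := h
  apply pvSpaceIff
  simp [pvDomChar] at hd
  have hr' : c.toNat ≠ 13 := fun h => hr (pvCharEq h)
  have hn' : c.toNat ≠ 10 := fun h => hn (pvCharEq h)
  omega

lemma pvWsSpace {c : Char} (h : c = ' ' ∨ c = '\t') : PySem.Chars.isspace c = true := by
  rcases h with rfl | rfl <;> decide

lemma pvIdentContNotWs {c : Char} (h : pvIdentCont c = true) : ¬ (c = ' ' ∨ c = '\t') := by
  rintro (rfl | rfl) <;> revert h <;> decide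

lemma pvIdentContNotColon {c : Char} (h : pvIdentCont c = true) : c ≠ ':' := by
  rintro rfl; revert h; decide

lemma pvRstripConsTail {c : Char} {l : List Char} (h : PySem.Chars.rstrip l ≠ []) :
    PySem.Chars.rstrip (c :: l) = c :: PySem.Chars.rstrip l := by
  unfold PySem.Chars.rstrip
  rw [List.reverse_cons, List.dropWhile_append]
  have : ¬ (l.reverse.dropWhile PySem.Chars.isspace).isEmpty := by
    intro he
    exact h (by simp [PySem.Chars.rstrip, List.isEmpty_iff.mp he])
  simp [this, PySem.Chars.rstrip]

-- condition for a valid tag continuation from state 3 (whitespace already seen after the tag)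
def pvCond3 (r : List Char) : Prop :=
  ':' ∈ r ∧ (r.takeWhile (fun c => decide (c ≠ ':'))).all (fun c => c == ' ' || c == '\t') = true

lemma pvS3 {r : List Char} (hdom : ∀ c ∈ r, pvCharOK c) :
    ∀ seen : Nat,
      (pvCond3 r → pvLineStep r 3 seen = (if seen + 1 ≥ 3 then .inl true else .inr (4, seen + 1))) ∧
      (¬ pvCond3 r → pvLineStep r 3 seen = .inl false ∨ pvLineStep r 3 seen = .inr (3, seen)) := by
  induction r with
  | nil =>
    intro seen
    refine ⟨fun h => absurd h ?_, fun _ => Or.inr (by simp [pvLineStep])⟩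
    simp [pvCond3]
  | cons c r ih =>
    intro seen
    have hdom' : ∀ c ∈ r, pvCharOK c := fun c hc => hdom c (by simp [hc])
    by_cases hws : c = ' ' ∨ c = '\t'
    · have hc' : c ≠ ':' := by rintro rfl; rcases hws with h | h <;> simp_all
      have hcond : pvCond3 (c :: r) ↔ pvCond3 r := by
        simp [pvCond3, List.takeWhile_cons, hc', hws]
        rcases hws with rfl | rfl <;> simp
      simp only [pvLineStep, hws, if_true]
      constructor
      · intro h; exact (ih hdom' seen).1 (hcond.mp h)
      · intro h; exact (ih hdom' seen).2 (fun h' => h (hcond.mpr h'))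
    · by_cases hc : c = ':'
      · subst hc
        constructor
        · intro _
          simp only [pvLineStep]
          rw [if_pos trivial]
          split_ifs with h3
          · rfl
          · exact pvLineStepConsume 4 (by omega) r (seen + 1)
        · intro h; exact absurd ⟨by simp, by simp [List.takeWhile_cons]⟩ h
      · constructor
        · intro h
          exfalso
          obtain ⟨h1, h2⟩ := h
          rw [List.takeWhile_cons] at h2
          simp [hc] at h2
          exact hws (by simpa using h2.1)
        · intro _
          left
          simp [pvLineStep, hws, hc]

-- condition for a valid tag continuation from state 2 (inside the tag identifier)
def pvCond2 (r : List Char) : Prop :=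
  ':' ∈ r ∧ (PySem.Chars.rstrip (r.takeWhile (fun c => decide (c ≠ ':')))).all pvIdentCont = true

lemma pvS2 {r : List Char} (hdom : ∀ c ∈ r, pvCharOK c) :
    ∀ seen : Nat,
      (pvCond2 r → pvLineStep r 2 seen = (if seen + 1 ≥ 3 then .inl true else .inr (4, seen + 1))) ∧
      (¬ pvCond2 r → pvLineStep r 2 seen = .inl false ∨ pvLineStep r 2 seen = .inr (2, seen) ∨
          pvLineStep r 2 seen = .inr (3, seen)) := by
  induction r with
  | nil =>
    intro seen
    refine ⟨fun h => absurd h ?_, fun _ => Or.inr (Or.inl (by simp [pvLineStep]))⟩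
    simp [pvCond2]
  | cons c r ih =>
    intro seen
    have hdom' : ∀ c ∈ r, pvCharOK c := fun c hc => hdom c (by simp [hc])
    by_cases hic : pvIdentCont c = true
    · have hc' : c ≠ ':' := pvIdentContNotColon hic
      have hnw : ¬ (c = ' ' ∨ c = '\t') := pvIdentContNotWs hic
      have hsp : PySem.Chars.isspace c = false := by
        rw [← Bool.not_eq_true]
        intro h
        exact hnw ((pvSpaceIff' (hdom c (by simp))).mp h)
      have hcond : pvCond2 (c :: r) ↔ pvCond2 r := by
        unfold pvCond2
        rw [List.takeWhile_cons]
        simp only [hc', decide_true, ne_eq, not_false_iff, if_pos]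
        rw [pvRstripConsNot hsp]
        simp only [List.all_cons, hic, Bool.true_and, List.mem_cons]
        constructor
        · rintro ⟨h1 | h1, h2⟩
          · exact absurd h1.symm hc'
          · exact ⟨h1, h2⟩
        · rintro ⟨h1, h2⟩
          exact ⟨Or.inr h1, h2⟩
      simp only [pvLineStep, hic, if_true]
      exact ⟨fun h => (ih hdom' seen).1 (hcond.mp h),
             fun h => (ih hdom' seen).2 (fun h' => h (hcond.mpr h'))⟩
    · by_cases hws : c = ' ' ∨ c = '\t'
      · have hc' : c ≠ ':' := by rintro rfl; rcases hws with h | h <;> simp_all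
        have hsp : PySem.Chars.isspace c = true := pvWsSpace hws
        have hstep : pvLineStep (c :: r) 2 seen = pvLineStep r 3 seen := by
          simp [pvLineStep, hic, hws]
        rw [hstep]
        have ht : (c :: r).takeWhile (fun c => decide (c ≠ ':')) =
            c :: r.takeWhile (fun c => decide (c ≠ ':')) := by
          rw [List.takeWhile_cons]; simp [hc']
        by_cases hnil : PySem.Chars.rstrip (r.takeWhile (fun c => decide (c ≠ ':'))) = []
        · -- everything before the colon (if any) in r is whitespace
          have hall : ∀ a ∈ r.takeWhile (fun c => decide (c ≠ ':')), PySem.Chars.isspace a :=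
            pvRstripNilIff.mp hnil
          have hcond : pvCond2 (c :: r) ↔ pvCond3 r := by
            unfold pvCond2 pvCond3
            rw [ht]
            constructor
            · rintro ⟨h1, _⟩
              have h1' : ':' ∈ r := by
                rcases List.mem_cons.mp h1 with h | h
                · exact absurd h.symm hc'
                · exact h
              refine ⟨h1', ?_⟩
              simp only [List.all_eq_true]
              intro a ha
              have haok : pvCharOK a := hdom' a ((List.takeWhile_prefix _).sublist.subset ha)
              have := (pvSpaceIff' haok).mp (hall a ha)
              rcases this with rfl | rfl <;> simp
            · rintro ⟨h1, _⟩
              refine ⟨List.mem_cons_of_mem _ h1, ?_⟩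
              have hz : PySem.Chars.rstrip (c :: r.takeWhile (fun c => decide (c ≠ ':'))) = [] := by
                rw [pvRstripNilIff]
                intro a ha
                rcases List.mem_cons.mp ha with rfl | ha
                · exact hsp
                · exact hall a ha
              rw [hz]
              rfl
          refine ⟨fun h => (pvS3 hdom' seen).1 (hcond.mp h), fun h => ?_⟩
          rcases (pvS3 hdom' seen).2 (fun h' => h (hcond.mpr h')) with h'' | h''
          · exact Or.inl h''
          · exact Or.inr (Or.inr h'')
        · -- some non-whitespace char sits between the gap and any colon: both sides invalid
          have hcondF : ¬ pvCond2 (c :: r) := by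
            unfold pvCond2
            rw [ht, pvRstripConsTail hnil]
            rintro ⟨_, h2⟩
            simp only [List.all_cons, Bool.and_eq_true] at h2
            exact hic h2.1
          have hcond3F : ¬ pvCond3 r := by
            rintro ⟨_, h2⟩
            apply hnil
            rw [pvRstripNilIff]
            intro a ha
            simp only [List.all_eq_true] at h2
            exact pvWsSpace (by simpa using h2 a ha)
          refine ⟨fun h => absurd h hcondF, fun _ => ?_⟩
          rcases (pvS3 hdom' seen).2 hcond3F with h | h
          · exact Or.inl h
          · exact Or.inr (Or.inr h)
      · by_cases hc : c = ':'
        · subst hc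
          refine ⟨fun _ => ?_, fun h => absurd ⟨by simp, by rw [List.takeWhile_cons]; simp [PySem.Chars.rstrip]⟩ h⟩
          simp only [pvLineStep, hic, Bool.false_eq_true, if_false, hws, if_pos rfl]
          rw [if_pos trivial]
          split_ifs with h3
          · rfl
          · exact pvLineStepConsume 4 (by omega) r (seen + 1)
        · have hsp : PySem.Chars.isspace c = false := by
            rw [← Bool.not_eq_true]
            intro h
            exact hws ((pvSpaceIff' (hdom c (by simp))).mp h)
          refine ⟨fun h => ?_, fun _ => Or.inl (by simp [pvLineStep, hic, hws, hc])⟩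
          exfalso
          obtain ⟨_, h2⟩ := h
          rw [List.takeWhile_cons] at h2
          simp only [hc, decide_true, ne_eq, not_false_iff, if_pos] at h2
          rw [pvRstripConsNot hsp] at h2
          simp only [List.all_cons, Bool.and_eq_true] at h2
          exact hic h2.1

-- A's per-line validity test, exactly as the A port computes it on a stripped line
def pvValid (s : List Char) : Prop :=
  (PySem.Chars.isIn [':'] s && pvIsIdent (PySem.Chars.strip (pvTagOf s))) = true

lemma pvIsInSingleton {a : Char} {s : List Char} : PySem.Chars.isIn [a] s = true ↔ a ∈ s := by
  rw [PySem.Chars.isIn_iff_infix, List.singleton_infix_iff]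

lemma pvScan0 {l : List Char} (hdom : ∀ c ∈ l, pvCharOK c) :
    ∀ seen : Nat,
      (PySem.Chars.strip l = [] → pvLineStep l 0 seen = .inr (0, seen)) ∧
      (PySem.Chars.startswith (PySem.Chars.strip l) ['#'] = true → pvLineStep l 0 seen = .inr (1, seen)) ∧
      (PySem.Chars.strip l ≠ [] → PySem.Chars.startswith (PySem.Chars.strip l) ['#'] = false →
        (pvValid (PySem.Chars.strip l) →
          pvLineStep l 0 seen = (if seen + 1 ≥ 3 then .inl true else .inr (4, seen + 1))) ∧
        (¬ pvValid (PySem.Chars.strip l) →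
          pvLineStep l 0 seen = .inl false ∨ pvLineStep l 0 seen = .inr (2, seen) ∨
            pvLineStep l 0 seen = .inr (3, seen))) := by
  induction l with
  | nil =>
    intro seen
    refine ⟨fun _ => by simp [pvLineStep], fun h => ?_, fun h _ => ?_⟩
    · exact absurd h (by decide)
    · exact absurd rfl h
  | cons c l ih =>
    intro seen
    have hdom' : ∀ c ∈ l, pvCharOK c := fun c hc => hdom c (by simp [hc])
    by_cases hws : c = ' ' ∨ c = '\t'
    · have hsp : PySem.Chars.isspace c = true := pvWsSpace hws
      have hstrip : PySem.Chars.strip (c :: l) = PySem.Chars.strip l := pvStripConsSpace hsp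
      have hstep : pvLineStep (c :: l) 0 seen = pvLineStep l 0 seen := by
        simp [pvLineStep, hws]
      rw [hstrip, hstep]
      exact ih hdom' seen
    · have hsp : PySem.Chars.isspace c = false := by
        rw [← Bool.not_eq_true]
        intro h
        exact hws ((pvSpaceIff' (hdom c (by simp))).mp h)
      have hstrip : PySem.Chars.strip (c :: l) = c :: PySem.Chars.rstrip l := pvStripConsNot hsp
      refine ⟨fun h => by rw [hstrip] at h; exact absurd h (by simp), ?_, ?_⟩
      · -- comment line: leading '#'
        intro h
        rw [hstrip] at h
        have hc : c = '#' := by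
          simp [PySem.Chars.startswith, List.isPrefixOf] at h
          exact h.symm
        subst hc
        simp only [pvLineStep]
        rw [if_pos trivial]
        exact pvLineStepConsume 1 (by omega) l seen
      · intro hne hnc
        rw [hstrip] at hnc
        have hc : c ≠ '#' := by
          intro h
          subst h
          simp [PySem.Chars.startswith, List.isPrefixOf] at hnc
        by_cases his : pvIdentStart c = true
        · -- tag line: relate pvValid of the stripped line to pvCond2 of the raw tail
          have hcns : c ≠ ':' := by
            rintro rfl
            revert his
            decide
          have hstep : pvLineStep (c :: l) 0 seen = pvLineStep l 2 seen := by
            simp [pvLineStep, hws, hc, his]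
          have hval : pvValid (PySem.Chars.strip (c :: l)) ↔ pvCond2 l := by
            rw [hstrip]
            unfold pvValid pvCond2 pvTagOf
            rw [List.takeWhile_cons]
            simp only [hcns, decide_true, ne_eq, not_false_iff, if_pos]
            rw [pvStripConsNot hsp]
            simp only [Bool.and_eq_true, pvIsIdent, his, Bool.true_and]
            rw [pvIsInSingleton]
            constructor
            · rintro ⟨h1, h2⟩
              have h1' : ':' ∈ l := by
                rcases List.mem_cons.mp h1 with h | h
                · exact absurd h.symm hcns
                · exact (pvMemRstrip (by decide)).mp h
              refine ⟨h1', ?_⟩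
              obtain ⟨w, hw, hwsp⟩ := pvRstripDecomp l
              have hmem : ':' ∈ PySem.Chars.rstrip l := (pvMemRstrip (by decide)).mpr h1'
              have htw : l.takeWhile (fun c => decide (c ≠ ':')) =
                  (PySem.Chars.rstrip l).takeWhile (fun c => decide (c ≠ ':')) := by
                conv_lhs => rw [hw]
                exact pvTakeWhileAppend ⟨':', hmem, by simp⟩
              rw [htw]
              exact h2
            · rintro ⟨h1, h2⟩
              have hmem : ':' ∈ PySem.Chars.rstrip l := (pvMemRstrip (by decide)).mpr h1
              refine ⟨List.mem_cons_of_mem _ hmem, ?_⟩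
              obtain ⟨w, hw, hwsp⟩ := pvRstripDecomp l
              have htw : l.takeWhile (fun c => decide (c ≠ ':')) =
                  (PySem.Chars.rstrip l).takeWhile (fun c => decide (c ≠ ':')) := by
                conv_lhs => rw [hw]
                exact pvTakeWhileAppend ⟨':', hmem, by simp⟩
              rw [htw] at h2
              exact h2
          rw [hstep]
          exact ⟨fun h => (pvS2 hdom' seen).1 (hval.mp h),
                 fun h => (pvS2 hdom' seen).2 (fun h' => h (hval.mpr h'))⟩
        · -- first meaningful char can start no identifier: both sides reject
          have hnv : ¬ pvValid (PySem.Chars.strip (c :: l)) := by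
            rw [hstrip]
            unfold pvValid pvTagOf
            by_cases hcc : c = ':'
            · subst hcc
              rw [List.takeWhile_cons]
              simp [pvIsIdent, PySem.Chars.strip, PySem.Chars.lstrip, PySem.Chars.rstrip]
            · rw [List.takeWhile_cons]
              simp only [hcc, decide_true, ne_eq, not_false_iff, if_pos]
              rw [pvStripConsNot hsp]
              simp [pvIsIdent, his]
          refine ⟨fun h => absurd h hnv, fun _ => Or.inl ?_⟩
          simp [pvLineStep, hws, hc, his]

-- the exact line-break test splitlines uses internally
def pvIsB (c : Char) : Bool :=
  decide (c.toNat = 10) || decide (c.toNat = 13) || decide (c.toNat = 11) || decide (c.toNat = 12) ||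
    decide (c.toNat = 28) || decide (c.toNat = 29) || decide (c.toNat = 30) || decide (c.toNat = 133) ||
    decide (c.toNat = 8232) || decide (c.toNat = 8233)

lemma pvSplitlinesEq (s : List Char) :
    PySem.Chars.splitlines s = PySem.Chars.splitlines.go pvIsB s [] [] := rfl

lemma pvGoAppend {l : List Char} (hl : ∀ c ∈ l, pvIsB c = false) :
    ∀ (t cur : List Char) (acc : List (List Char)),
      PySem.Chars.splitlines.go pvIsB (l ++ t) cur acc =
        PySem.Chars.splitlines.go pvIsB t (l.reverse ++ cur) acc := by
  induction l with
  | nil => intro t cur acc; simp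
  | cons c l ih =>
    intro t cur acc
    have hc : pvIsB c = false := hl c (by simp)
    have hcr : c ≠ '\x0d' := by rintro rfl; simp [pvIsB] at hc
    have hl' : ∀ c ∈ l, pvIsB c = false := fun c hc => hl c (by simp [hc])
    rw [List.cons_append, PySem.Chars.splitlines.go]
    · simp [hc, ih hl']
    · intro rest h1 h2
      exact hcr h1

lemma pvGoNil (cur : List Char) (acc : List (List Char)) :
    PySem.Chars.splitlines.go pvIsB [] cur acc =
      if cur.isEmpty then acc.reverse else (cur.reverse :: acc).reverse := by
  simp [PySem.Chars.splitlines.go]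

lemma pvGoCRLF (rest cur : List Char) (acc : List (List Char)) :
    PySem.Chars.splitlines.go pvIsB ('\x0d' :: '\n' :: rest) cur acc =
      PySem.Chars.splitlines.go pvIsB rest [] (cur.reverse :: acc) := by
  simp [PySem.Chars.splitlines.go]

lemma pvGoBreak {c : Char} (hb : pvIsB c = true) (hcr : c ≠ '\x0d') (rest cur : List Char)
    (acc : List (List Char)) :
    PySem.Chars.splitlines.go pvIsB (c :: rest) cur acc =
      PySem.Chars.splitlines.go pvIsB rest [] (cur.reverse :: acc) := by
  rw [PySem.Chars.splitlines.go]
  · rw [if_pos hb]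
  · intro r h1 h2
    exact hcr h1

lemma pvGoCR {rest : List Char} (hr : rest.head? ≠ some '\n') (cur : List Char)
    (acc : List (List Char)) :
    PySem.Chars.splitlines.go pvIsB ('\x0d' :: rest) cur acc =
      PySem.Chars.splitlines.go pvIsB rest [] (cur.reverse :: acc) := by
  rw [PySem.Chars.splitlines.go]
  · rw [if_pos (by decide)]
  · intro r h1 h2
    exact hr (by rw [h2]; rfl)

lemma pvGoCons {c : Char} (hb : pvIsB c = false) (rest cur : List Char)
    (acc : List (List Char)) :
    PySem.Chars.splitlines.go pvIsB (c :: rest) cur acc =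
      PySem.Chars.splitlines.go pvIsB rest (c :: cur) acc := by
  rw [PySem.Chars.splitlines.go]
  · rw [if_neg (by simp [hb])]
  · intro r h1 h2
    subst h1
    simp [pvIsB] at hb

lemma pvGoAcc : ∀ (n : Nat) (s cur : List Char) (acc : List (List Char)), s.length ≤ n →
    PySem.Chars.splitlines.go pvIsB s cur acc =
      acc.reverse ++ PySem.Chars.splitlines.go pvIsB s cur [] := by
  intro n
  induction n with
  | zero =>
    intro s cur acc hs
    have : s = [] := List.eq_nil_of_length_eq_zero (by omega)
    subst this
    rw [pvGoNil, pvGoNil]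
    split_ifs <;> simp
  | succ n ih =>
    intro s cur acc hs
    rcases s with _ | ⟨c, rest⟩
    · rw [pvGoNil, pvGoNil]
      split_ifs <;> simp
    · by_cases hc : c = '\x0d'
      · subst hc
        rcases rest with _ | ⟨d, rest'⟩
        · rw [pvGoCR (by simp) cur acc, pvGoCR (by simp) cur []]
          rw [ih [] [] (cur.reverse :: acc) (by simp),
              ih [] [] [cur.reverse] (by simp)]
          simp
        · by_cases hd : d = '\n'
          · subst hd
            rw [pvGoCRLF, pvGoCRLF]
            rw [ih rest' [] (cur.reverse :: acc) (by simp at hs ⊢; omega),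
                ih rest' [] [cur.reverse] (by simp at hs ⊢; omega)]
            simp
          · rw [pvGoCR (by simp [hd]) cur acc, pvGoCR (by simp [hd]) cur []]
            rw [ih (d :: rest') [] (cur.reverse :: acc) (by simp at hs ⊢; omega),
                ih (d :: rest') [] [cur.reverse] (by simp at hs ⊢; omega)]
            simp
      · by_cases hb : pvIsB c = true
        · rw [pvGoBreak hb hc rest cur acc, pvGoBreak hb hc rest cur []]
          rw [ih rest [] (cur.reverse :: acc) (by simp at hs ⊢; omega),
              ih rest [] [cur.reverse] (by simp at hs ⊢; omega)]
          simp
        · rw [pvGoCons (by simpa using hb) rest cur acc, pvGoCons (by simpa using hb) rest cur []]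
          exact ih rest (c :: cur) acc (by simp at hs ⊢; omega)

lemma pvCharOKNoBreak {c : Char} (h : pvCharOK c) : pvIsB c = false := by
  obtain ⟨hd, hr, hn⟩ := h
  simp only [pvDomChar, Bool.or_eq_true, Bool.and_eq_true, decide_eq_true_eq, beq_iff_eq] at hd
  have hr' : c.toNat ≠ 13 := fun h => hr (pvCharEq h)
  have hn' : c.toNat ≠ 10 := fun h => hn (pvCharEq h)
  simp only [pvIsB, Bool.or_eq_false_iff, decide_eq_false_iff_not]
  omega

lemma pvSLnil : PySem.Chars.splitlines ([] : List Char) = [] := rfl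

lemma pvSLlast {l : List Char} (hl : ∀ c ∈ l, pvIsB c = false) (hne : l ≠ []) :
    PySem.Chars.splitlines l = [l] := by
  rw [pvSplitlinesEq, show l = l ++ [] by simp, pvGoAppend hl, pvGoNil]
  simp [hne]

lemma pvSLn {l r : List Char} (hl : ∀ c ∈ l, pvIsB c = false) :
    PySem.Chars.splitlines (l ++ '\n' :: r) = l :: PySem.Chars.splitlines r := by
  rw [pvSplitlinesEq, pvGoAppend hl, pvGoBreak (by decide) (by decide),
      pvGoAcc r.length r [] _ le_rfl]
  simp [pvSplitlinesEq]

lemma pvSLcrlf {l r : List Char} (hl : ∀ c ∈ l, pvIsB c = false) :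
    PySem.Chars.splitlines (l ++ '\x0d' :: '\n' :: r) = l :: PySem.Chars.splitlines r := by
  rw [pvSplitlinesEq, pvGoAppend hl, pvGoCRLF, pvGoAcc r.length r [] _ le_rfl]
  simp [pvSplitlinesEq]

lemma pvSLcr {l r : List Char} (hl : ∀ c ∈ l, pvIsB c = false) (hr : r.head? ≠ some '\n') :
    PySem.Chars.splitlines (l ++ '\x0d' :: r) = l :: PySem.Chars.splitlines r := by
  rw [pvSplitlinesEq, pvGoAppend hl, pvGoCR hr, pvGoAcc r.length r [] _ le_rfl]
  simp [pvSplitlinesEq]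

lemma pvLltBNoCr {r : List Char} (hr : r.head? ≠ some '\n') (st used seen : Nat) :
    lltB r st used seen true = lltB r st used seen false := by
  rcases r with _ | ⟨c, r⟩
  · rfl
  · have hc : c ≠ '\n' := by
      intro h
      exact hr (by rw [h]; rfl)
    simp [lltB, hc]

lemma pvLltBEol {c : Char} (hc : c = '\x0d' ∨ c = '\n') (r : List Char) (st used seen : Nat) :
    lltB (c :: r) st used seen false =
      (if st = 2 ∨ st = 3 then false
       else if used + 1 ≥ 32 then false
       else lltB r 0 (used + 1) seen (c = '\x0d')) := by
  rcases st with _ | _ | _ | _ | st <;> rcases hc with rfl | rfl <;> simp [lltB]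

lemma pvFinish {l t : List Char} {R : List (List Char)} {used seen : Nat}
    (hlOK : ∀ c ∈ l, pvCharOK c)
    (hsplit : (PySem.Chars.splitlines (l ++ t)).take (32 - used) = l :: R)
    (hcont : ∀ st' seen', st' = 0 ∨ st' = 1 ∨ st' = 4 → seen' ≤ 2 →
        lltB t st' used seen' false = lltGoA R seen')
    (hstop : ∀ st' seen', st' = 2 ∨ st' = 3 → lltB t st' used seen' false = false)
    (hseen : seen ≤ 2) :
    (match pvLineStep l 0 seen with
      | .inl b => b
      | .inr (st', seen') => lltB t st' used seen' false) =
    lltGoA ((PySem.Chars.splitlines (l ++ t)).take (32 - used)) seen := by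
  rw [hsplit]
  by_cases hE : PySem.Chars.strip l = []
  · have hEb : (PySem.Chars.strip l).isEmpty = true := by simp [hE]
    rw [(pvScan0 hlOK seen).1 hE]
    simp only [lltGoA, hEb, Bool.true_or, if_true]
    exact hcont 0 seen (by omega) hseen
  · have hEb : (PySem.Chars.strip l).isEmpty = false := by simp [hE]
    by_cases hC : PySem.Chars.startswith (PySem.Chars.strip l) ['#'] = true
    · rw [((pvScan0 hlOK seen).2.1) hC]
      simp only [lltGoA, hC, Bool.or_true, if_true]
      exact hcont 1 seen (by omega) hseen
    · have hC' : PySem.Chars.startswith (PySem.Chars.strip l) ['#'] = false := by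
        simpa using hC
      by_cases hV : pvValid (PySem.Chars.strip l)
      · rw [((pvScan0 hlOK seen).2.2 hE hC').1 hV]
        obtain ⟨hIn, hId⟩ := Bool.and_eq_true_iff.mp hV
        by_cases h3 : seen + 1 ≥ 3
        · rw [if_pos h3]
          simp [lltGoA, hEb, hC', hIn, hId, h3]
        · rw [if_neg h3]
          have hA : lltGoA (l :: R) seen = (if seen + 1 ≥ 3 then true else lltGoA R (seen + 1)) := by
            simp [lltGoA, hEb, hC', hIn, hId]
          rw [hA, if_neg h3]
          exact hcont 4 (seen + 1) (by omega) (by omega)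
      · have hnv : (PySem.Chars.isIn [':'] (PySem.Chars.strip l) = false) ∨
            (pvIsIdent (PySem.Chars.strip (pvTagOf (PySem.Chars.strip l))) = false) := by
          unfold pvValid at hV
          rcases Bool.and_eq_false_iff.mp (Bool.eq_false_iff.mpr hV) with h' | h'
          · exact Or.inl h'
          · exact Or.inr h'
        have hA : lltGoA (l :: R) seen = false := by
          rcases hnv with hnv | hnv <;> simp [lltGoA, hEb, hC', hnv]
        rw [hA]
        rcases ((pvScan0 hlOK seen).2.2 hE hC').2 hV with h | h | h <;> rw [h]
        · exact hstop 2 seen (Or.inl rfl)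
        · exact hstop 3 seen (Or.inr rfl)

lemma pvMain : ∀ (n : Nat) (cs : List Char), cs.length ≤ n → (∀ c ∈ cs, pvDomChar c = true) →
    ∀ used seen : Nat, used < 32 → seen ≤ 2 →
    lltB cs 0 used seen false =
      lltGoA ((PySem.Chars.splitlines cs).take (32 - used)) seen := by
  intro n
  induction n with
  | zero =>
    intro cs hlen _ used seen _ _
    have : cs = [] := List.eq_nil_of_length_eq_zero (by omega)
    subst this
    simp [lltB, pvSLnil, lltGoA]
  | succ n ih =>
    intro cs hlen hdom used seen hused hseen
    rcases hcs0 : cs with _ | ⟨c0, cs0⟩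
    · simp [lltB, pvSLnil, lltGoA]
    rw [← hcs0]
    have hcsne : cs ≠ [] := by rw [hcs0]; simp
    clear hcs0
    set p : Char → Bool := fun c => !(c == '\x0d' || c == '\n') with hp
    set l := cs.takeWhile p with hldef
    set t := cs.dropWhile p with htdef
    have hcs : cs = l ++ t := (List.takeWhile_append_dropWhile).symm
    have hlOK : ∀ c ∈ l, pvCharOK c := by
      intro c hc
      have h1 : pvDomChar c = true := hdom c ((List.takeWhile_prefix _).sublist.subset hc)
      have h2 : p c = true := List.mem_takeWhile_imp hc
      simp only [hp, Bool.not_eq_true', Bool.or_eq_false_iff, beq_eq_false_iff_ne] at h2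
      exact ⟨h1, h2.1, h2.2⟩
    have hlNE : ∀ c ∈ l, c ≠ '\x0d' ∧ c ≠ '\n' := fun c hc => (hlOK c hc).2
    have hlB : ∀ c ∈ l, pvIsB c = false := fun c hc => pvCharOKNoBreak (hlOK c hc)
    have hlen' : l.length + t.length = cs.length := by
      rw [hcs, List.length_append]
    have hk : 1 ≤ 32 - used := by omega
    rw [hcs, pvLltBAppend hlNE t 0 used seen]
    -- shape of the rest of the text
    rcases ht : t with _ | ⟨c, r⟩
    · -- no line break: the whole text is one line
      rcases hl : l with _ | _
      · exfalso; apply hcsne; rw [hcs, hl, ht]; rfl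
      rw [← hl]
      have hlne : l ≠ [] := by rw [hl]; simp
      have hsplit : (PySem.Chars.splitlines (l ++ ([] : List Char))).take (32 - used) = l :: [] := by
        rw [List.append_nil, pvSLlast hlB hlne]
        rcases Nat.exists_eq_add_of_le hk with ⟨m, hm⟩
        rw [hm]
        simp
      refine pvFinish hlOK hsplit ?_ ?_ hseen
      · intro st' seen' _ _
        simp [lltB, lltGoA]
      · intro st' seen' _
        simp [lltB]
    · -- a line break follows the first line
      have hcEol : c = '\x0d' ∨ c = '\n' := by
        have := List.head?_dropWhile_not p cs
        rw [← htdef, ht] at this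
        simp only [List.head?_cons] at this
        simp only [hp] at this
        by_cases h : c = '\x0d'
        · exact Or.inl h
        · exact Or.inr (by simpa [h] using this)
      have hdom' : ∀ x ∈ t, pvDomChar x = true := by
        intro x hx
        exact hdom x ((List.dropWhile_suffix p).subset (htdef ▸ ht ▸ hx))
      have hbreak : ∃ r' : List Char, PySem.Chars.splitlines cs = l :: PySem.Chars.splitlines r' ∧
          r'.length + 1 ≤ t.length ∧ (∀ x ∈ r', pvDomChar x = true) ∧
          (∀ seen' : Nat, lltB r 0 (used + 1) seen' (c = '\x0d') =
            lltB r' 0 (used + 1) seen' false) := by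
        have hrdom : ∀ x ∈ r, pvDomChar x = true := fun x hx => hdom' x (by rw [ht]; simp [hx])
        rcases hcEol with rfl | rfl
        · -- the break starts with '\r'
          rcases hr : r with _ | ⟨d, r2⟩
          · refine ⟨[], by rw [hcs, ht, hr]; exact pvSLcr hlB (by simp), by simp [ht, hr], by simp, fun seen' => ?_⟩
            rfl
          · by_cases hd : d = '\n'
            · subst hd
              refine ⟨r2, by rw [hcs, ht, hr]; exact pvSLcrlf hlB, by rw [ht, hr]; simp,
                fun x hx => hrdom x (by rw [hr]; simp [hx]), fun seen' => ?_⟩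
              simp [lltB]
            · refine ⟨r, by rw [hcs, ht]; exact pvSLcr hlB (by rw [hr]; simp [hd]), by rw [ht]; simp,
                hrdom, fun seen' => ?_⟩
              rw [← hr, show (decide (('\x0d' : Char) = '\x0d')) = true from rfl]
              exact pvLltBNoCr (by rw [hr]; simp [hd]) 0 (used + 1) seen'
        · -- the break is a bare '\n'
          refine ⟨r, by rw [hcs, ht]; exact pvSLn hlB, by rw [ht]; simp, hrdom, fun seen' => ?_⟩
          rfl
      obtain ⟨r', hsl, hlenr, hdomr, hcr⟩ := hbreak
      have hsplit : (PySem.Chars.splitlines (l ++ (c :: r))).take (32 - used) =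
          l :: ((PySem.Chars.splitlines r').take (32 - used - 1)) := by
        rw [← ht, ← hcs, hsl]
        rcases Nat.exists_eq_add_of_le hk with ⟨m, hm⟩
        rw [hm, Nat.add_comm 1 m, List.take_succ_cons]
        congr 1 <;> omega
      refine pvFinish hlOK hsplit ?_ ?_ hseen
      · -- continuation for the skip states 0, 1, 4
        intro st' seen' hst hseen'
        rw [pvLltBEol hcEol r st' used seen']
        have h23 : ¬ (st' = 2 ∨ st' = 3) := by omega
        rw [if_neg h23]
        by_cases h32 : used + 1 ≥ 32
        · rw [if_pos h32]
          have : 32 - used - 1 = 0 := by omega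
          rw [this]
          simp [lltGoA]
        · rw [if_neg h32, hcr seen',
              ih r' (by rw [hcs, List.length_append] at hlen; omega) hdomr (used + 1) seen' (by omega) hseen']
          congr 1 <;> omega
      · -- a line ending in state 2 or 3 rejects
        intro st' seen' hst
        rw [pvLltBEol hcEol r st' used seen', if_pos hst]

-- ===== VERDICT (by name: the statement is the Claim_ definition above) =====
theorem looks_like_tag_value_py_spec : Claim_equal_looks_like_tag_value_py := by
  intro text hdom
  unfold Spec_looks_like_tag_value_py looks_like_tag_value_py looks_like_tag_value_py_alt
  have hdom' : ∀ c ∈ text.toList, pvDomChar c = true := by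
    intro c hc
    exact List.all_eq_true.mp hdom c hc
  rw [pvMain text.toList.length text.toList le_rfl hdom' 0 0 (by omega) (by omega)]
  rw [PySem.List.slice_to]
  · rfl
  · omega
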